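-- pv_equiv track=rewrite | github.com/LukhasAI/Lukhas | release_artifacts/matriz_readiness_v1/scripts/generate_flatten_map.py | module_candidates
-- ===== SOURCE A (Python) =====
-- def module_candidates(top_files, from_counts, simple_counts, limit=50):
--     # compute import_count per file by checking occurrences of their dotted module roots
--     candidates = []
--     for f in top_files:
--         depth = f.count("/")
--         # infer module root e.g., candidate/core/matrix/nodes/memory_node.py -> candidate.core.matrix.nodes.memory_node
--         mod = f.replace("/", ".").rstrip(".py")
--         # aggregate import counts by seeing if module appears as prefix in import counts
--         ic = 0
--         for im, cnt in list(from_counts.items()) + list(simple_counts.items()):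
--             if im.startswith(mod) or mod.startswith(im) or im.startswith(mod.split(".")[0]):
--                 ic += cnt
--         score = depth * 2 + ic
--         candidates.append((score, depth, ic, f))
--     # sort by score desc, return top limit
--     candidates.sort(reverse=True, key=lambda x: (x[0], x[2], x[1]))
--     return candidates[:limit]
-- ===== SOURCE B (Python) =====
-- def module_candidates(top_files, from_counts, simple_counts, limit=50):
--     # One shared scan per distinct module root instead of per file: the match test
--     # collapses to "im and root are prefix-comparable", which depends only on root.
--     entries = list(from_counts.items()) + list(simple_counts.items())
--     cache = {}
--     out = []
--     for f in top_files:
--         depth = f.count("/")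
--         root = f.replace("/", ".").rstrip(".py").split(".")[0]
--         if root not in cache:
--             cache[root] = sum(c for im, c in entries
--                               if im.startswith(root) or root.startswith(im))
--         ic = cache[root]
--         out.append((depth * 2 + ic, depth, ic, f))
--     out.sort(key=lambda t: (t[0], t[2], t[1]), reverse=True)
--     return out[:limit]
-- ===== Notes on version B (the rewrite author's own statement) =====
-- stated objective: faster
-- what changed: A rescans every import entry for every file with a three-way prefix test; B proves the test depends only on the file's module root (im and root prefix-comparable) and caches one entry scan per distinct root in a dict, so repeated roots cost O(1).
import Mathlib
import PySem

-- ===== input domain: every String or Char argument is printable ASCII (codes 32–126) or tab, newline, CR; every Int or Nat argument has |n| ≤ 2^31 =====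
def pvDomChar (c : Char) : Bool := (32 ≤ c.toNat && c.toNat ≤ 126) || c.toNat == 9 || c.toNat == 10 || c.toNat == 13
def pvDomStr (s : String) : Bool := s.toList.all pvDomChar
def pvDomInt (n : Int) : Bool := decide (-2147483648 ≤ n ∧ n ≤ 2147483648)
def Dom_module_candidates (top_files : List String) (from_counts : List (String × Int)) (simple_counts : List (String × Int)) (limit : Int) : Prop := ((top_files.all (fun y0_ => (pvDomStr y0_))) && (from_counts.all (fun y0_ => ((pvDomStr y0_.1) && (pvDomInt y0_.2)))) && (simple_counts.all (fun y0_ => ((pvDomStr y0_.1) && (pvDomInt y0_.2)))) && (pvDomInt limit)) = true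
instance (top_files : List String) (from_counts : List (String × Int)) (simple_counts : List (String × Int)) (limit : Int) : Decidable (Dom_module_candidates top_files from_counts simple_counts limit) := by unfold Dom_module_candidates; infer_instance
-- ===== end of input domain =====

-- B replaces A's per-file scan of all import entries by one scan per distinct module ROOT
-- (the match test provably depends only on the root), cached in a dict; same sort and cut.
-- The dict parameters are modelled as association lists; both ports read them through
-- PySem.Dict.ofList (= Python's dict construction: first-position, last-value on duplicates).

-- ===== PORT A =====
-- exact port of s.rstrip(".py"): drop the characters '.', 'p', 'y' from the right end
def pvRstripPy (s : String) : String :=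
  String.ofList ((s.toList.reverse.dropWhile (fun c => c == '.' || c == 'p' || c == 'y')).reverse)

-- mod.split(".")[0]  (split by a nonempty separator never raises; [0] always exists)
def pvRoot (mod : String) : String :=
  String.ofList (PySem.List.pyGetD (PySem.Chars.splitOn mod.toList ['.']) 0 [])

-- A's match test: im.startswith(mod) or mod.startswith(im) or im.startswith(mod.split(".")[0])
def pvCondA (mod im : String) : Bool :=
  PySem.Str.startswith im mod || PySem.Str.startswith mod im ||
    PySem.Str.startswith im (pvRoot mod)

-- A's inner loop: ic accumulated over the concatenated items
def pvIcA (entries : List (String × Int)) (mod : String) : Int :=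
  entries.foldl (fun ic p => if pvCondA mod p.1 then ic + p.2 else ic) 0

def module_candidates (top_files : List String) (from_counts : List (String × Int)) (simple_counts : List (String × Int)) (limit : Int) : List (Int × Int × Int × String) :=
  let entries := (PySem.Dict.ofList from_counts).items ++ (PySem.Dict.ofList simple_counts).items
  let candidates := top_files.foldl (fun acc f =>
    let depth : Int := (PySem.Str.count f "/" : Int)
    let mod := pvRstripPy (PySem.Str.replace f "/" ".")
    let ic := pvIcA entries mod
    acc ++ [(depth * 2 + ic, depth, ic, f)]) []
  PySem.List.slice (PySem.List.sorted candidates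
    (fun x => toLex (x.1, toLex (x.2.2.1, x.2.1))) true) none (some limit)

-- ===== PORT B =====
-- B's match test: im and root prefix-comparable
def pvCondB (root im : String) : Bool :=
  PySem.Str.startswith im root || PySem.Str.startswith root im

-- B's per-root sum over the entries
def pvIcB (entries : List (String × Int)) (root : String) : Int :=
  entries.foldl (fun s p => if pvCondB root p.1 then s + p.2 else s) 0

-- B's loop body: fill the cache on a miss, read it, append the candidate row
def pvStepB (entries : List (String × Int))
    (st : PySem.Dict String Int × List (Int × Int × Int × String)) (f : String) :
    PySem.Dict String Int × List (Int × Int × Int × String) :=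
  let depth : Int := (PySem.Str.count f "/" : Int)
  let root := pvRoot (pvRstripPy (PySem.Str.replace f "/" "."))
  let cache := if st.1.contains root then st.1 else st.1.insert root (pvIcB entries root)
  let ic := cache.getD root 0
  (cache, st.2 ++ [(depth * 2 + ic, depth, ic, f)])

def module_candidates_alt (top_files : List String) (from_counts : List (String × Int)) (simple_counts : List (String × Int)) (limit : Int) : List (Int × Int × Int × String) :=
  let entries := (PySem.Dict.ofList from_counts).items ++ (PySem.Dict.ofList simple_counts).items
  let out := (top_files.foldl (pvStepB entries) (PySem.Dict.empty, [])).2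
  PySem.List.slice (PySem.List.sorted out
    (fun x => toLex (x.1, toLex (x.2.2.1, x.2.1))) true) none (some limit)

-- ===== PRECONDITION & SPEC =====
def Spec_module_candidates (top_files : List String) (from_counts : List (String × Int)) (simple_counts : List (String × Int)) (limit : Int) (out : List (Int × Int × Int × String)) : Prop := out = module_candidates_alt top_files from_counts simple_counts limit
instance (top_files : List String) (from_counts : List (String × Int)) (simple_counts : List (String × Int)) (limit : Int) (out : List (Int × Int × Int × String)) : Decidable (Spec_module_candidates top_files from_counts simple_counts limit out) := by unfold Spec_module_candidates; infer_instance

-- ===== CLAIM (what is proved, stated in full; the proofs are below) =====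
def Claim_equal_module_candidates : Prop := ∀ (top_files : List String) (from_counts : List (String × Int)) (simple_counts : List (String × Int)) (limit : Int), Dom_module_candidates top_files from_counts simple_counts limit → Spec_module_candidates top_files from_counts simple_counts limit (module_candidates top_files from_counts simple_counts limit)

-- ===== LEMMAS AND PROOFS =====

-- proof-side description of one candidate row, A's way and B's way
def pvRowA (entries : List (String × Int)) (f : String) : Int × Int × Int × String :=
  ((PySem.Str.count f "/" : Int) * 2 + pvIcA entries (pvRstripPy (PySem.Str.replace f "/" ".")),
   (PySem.Str.count f "/" : Int), pvIcA entries (pvRstripPy (PySem.Str.replace f "/" ".")), f)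

def pvRowB (entries : List (String × Int)) (f : String) : Int × Int × Int × String :=
  ((PySem.Str.count f "/" : Int) * 2
     + pvIcB entries (pvRoot (pvRstripPy (PySem.Str.replace f "/" "."))),
   (PySem.Str.count f "/" : Int),
   pvIcB entries (pvRoot (pvRstripPy (PySem.Str.replace f "/" "."))), f)

-- splitOn's worker ignores the accumulator except for prepending it (reversed)
theorem pv_go_acc (sep : List Char) (fuel : Nat) : ∀ (l cur : List Char) (acc : List (List Char)),
    PySem.Chars.splitOn.go sep fuel l cur acc
      = acc.reverse ++ PySem.Chars.splitOn.go sep fuel l cur [] := by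
  induction fuel with
  | zero => intro l cur acc; rw [PySem.Chars.splitOn.go.eq_def, PySem.Chars.splitOn.go.eq_def]; simp
  | succ n ih =>
    intro l cur acc
    cases l with
    | nil => rw [PySem.Chars.splitOn.go.eq_def, PySem.Chars.splitOn.go.eq_def]; simp
    | cons c rest =>
      rw [PySem.Chars.splitOn.go.eq_def]
      conv_rhs => rw [PySem.Chars.splitOn.go.eq_def]
      simp only
      split_ifs with h
      · rw [ih _ _ (cur.reverse :: acc), ih _ _ [cur.reverse]]
        simp
      · rw [ih rest (c::cur) acc]

-- first piece produced by splitOn's worker on separator "." = chars up to the first '.'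
set_option maxRecDepth 4096 in
theorem pv_go_head (fuel : Nat) : ∀ (l cur : List Char), l.length < fuel →
    (PySem.Chars.splitOn.go ['.'] fuel l cur []).headD []
      = cur.reverse ++ l.takeWhile (fun c => c != '.') := by
  induction fuel with
  | zero => intro l cur h; omega
  | succ n ih =>
    intro l cur h
    cases l with
    | nil => rw [PySem.Chars.splitOn.go.eq_def]; simp
    | cons c rest =>
      rw [PySem.Chars.splitOn.go.eq_def]
      simp only
      split_ifs with hp
      · have hc : ('.' = c) := by simpa [List.isPrefixOf] using hp
        rw [pv_go_acc]
        rw [List.takeWhile_cons_of_neg (p := fun c => c != '.') (l := rest) (by simp [← hc])]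
        simp only [List.reverse_singleton, List.singleton_append, List.headD_cons, List.append_nil]
      · have hc : (c != '.') = true := by
          by_contra hcc
          simp at hcc
          exact hp (by simp [List.isPrefixOf, hcc])
        rw [ih rest (c :: cur) (by simp at h; omega)]
        rw [List.takeWhile_cons_of_pos (p := fun c => c != '.') (l := rest) hc]
        simp only [List.reverse_cons, List.append_assoc, List.singleton_append]

theorem pv_getD_zero_headD (xs : List (List Char)) (d : List Char) : xs.getD 0 d = xs.headD d := by
  cases xs <;> simp

theorem pv_root_toList (m : String) :
    (pvRoot m).toList = m.toList.takeWhile (fun c => c != '.') := by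
  unfold pvRoot PySem.Chars.splitOn
  rw [String.toList_ofList]
  rw [PySem.List.pyGetD_zero, pv_getD_zero_headD]
  rw [pv_go_head (m.toList.length + 1) m.toList [] (by omega)]
  simp

theorem pv_root_prefix (m : String) : (pvRoot m).toList <+: m.toList := by
  rw [pv_root_toList]; exact List.takeWhile_prefix _

-- the heart of the rewrite: A's three-way test equals B's root-comparability test
theorem pv_cond_eq (mod im : String) : pvCondA mod im = pvCondB (pvRoot mod) im := by
  have hpre : (pvRoot mod).toList <+: mod.toList := pv_root_prefix mod
  apply Bool.coe_iff_coe.mp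
  simp only [pvCondA, pvCondB, PySem.Str.startswith_eq, Bool.or_eq_true,
    PySem.Chars.startswith_iff]
  constructor
  · rintro ((h | h) | h)
    · exact Or.inl (hpre.trans h)
    · rcases List.prefix_or_prefix_of_prefix hpre h with h' | h'
      · exact Or.inl h'
      · exact Or.inr h'
    · exact Or.inl h
  · rintro (h | h)
    · exact Or.inr h
    · exact Or.inl (Or.inr (h.trans hpre))

theorem pv_ic_eq (entries : List (String × Int)) (mod : String) :
    pvIcA entries mod = pvIcB entries (pvRoot mod) := by
  unfold pvIcA pvIcB
  congr 1
  funext s p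
  rw [pv_cond_eq]

theorem pv_row_eq (entries : List (String × Int)) (f : String) :
    pvRowA entries f = pvRowB entries f := by
  unfold pvRowA pvRowB
  rw [pv_ic_eq]

-- one step of B's loop, on a cache hit resp. miss
theorem pv_stepB_hit (entries : List (String × Int)) (cache : PySem.Dict String Int)
    (out : List (Int × Int × Int × String)) (f : String)
    (h : cache.contains (pvRoot (pvRstripPy (PySem.Str.replace f "/" "."))) = true)
    (hv : cache.getD (pvRoot (pvRstripPy (PySem.Str.replace f "/" "."))) 0
            = pvIcB entries (pvRoot (pvRstripPy (PySem.Str.replace f "/" ".")))) :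
    pvStepB entries (cache, out) f = (cache, out ++ [pvRowB entries f]) := by
  unfold pvStepB
  simp only [if_pos h, hv]
  rfl

theorem pv_stepB_miss (entries : List (String × Int)) (cache : PySem.Dict String Int)
    (out : List (Int × Int × Int × String)) (f : String)
    (h : ¬ cache.contains (pvRoot (pvRstripPy (PySem.Str.replace f "/" "."))) = true) :
    pvStepB entries (cache, out) f
      = (cache.insert (pvRoot (pvRstripPy (PySem.Str.replace f "/" ".")))
           (pvIcB entries (pvRoot (pvRstripPy (PySem.Str.replace f "/" ".")))),
         out ++ [pvRowB entries f]) := by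
  unfold pvStepB
  simp only [if_neg h, PySem.Dict.getD_insert_self]
  rfl

-- the memoising fold of B produces exactly one pvRowB row per file
theorem pv_foldB (entries : List (String × Int)) :
    ∀ (files : List String) (cache : PySem.Dict String Int)
      (out : List (Int × Int × Int × String)),
      (∀ r, cache.contains r = true → cache.getD r 0 = pvIcB entries r) →
      (files.foldl (pvStepB entries) (cache, out)).2 = out ++ files.map (pvRowB entries) := by
  intro files
  induction files with
  | nil => intro cache out _; simp
  | cons f rest ih =>
    intro cache out hc
    rw [List.foldl_cons, List.map_cons]
    by_cases h : cache.contains (pvRoot (pvRstripPy (PySem.Str.replace f "/" "."))) = true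
    · rw [pv_stepB_hit entries cache out f h (hc _ h)]
      rw [ih cache _ hc]
      simp
    · rw [pv_stepB_miss entries cache out f h]
      rw [ih _ _ ?_]
      · simp
      · intro r hr
        rw [PySem.Dict.contains_insert] at hr
        rcases Bool.or_eq_true _ _ |>.mp hr with h1 | h1
        · rw [eq_of_beq h1, PySem.Dict.getD_insert_self]
        · have hne : r ≠ pvRoot (pvRstripPy (PySem.Str.replace f "/" ".")) := by
            intro hrq
            rw [hrq] at h1
            rw [h1] at h
            exact h rfl
          rw [PySem.Dict.getD_insert, if_neg hne, hc _ h1]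

-- A's append-loop is a map
theorem pv_foldA (entries : List (String × Int)) (top_files : List String) :
    top_files.foldl (fun acc f =>
      let depth : Int := (PySem.Str.count f "/" : Int)
      let mod := pvRstripPy (PySem.Str.replace f "/" ".")
      let ic := pvIcA entries mod
      acc ++ [(depth * 2 + ic, depth, ic, f)]) []
      = top_files.map (pvRowA entries) :=
  PySem.List.foldl_append_singleton_eq_map (pvRowA entries) top_files []

-- ===== VERDICT (by name: the statement is the Claim_ definition above) =====
theorem module_candidates_spec : Claim_equal_module_candidates := by
  intro top_files from_counts simple_counts limit _
  unfold Spec_module_candidates module_candidates module_candidates_alt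
  simp only
  rw [pv_foldA]
  rw [pv_foldB _ _ PySem.Dict.empty [] (by intro r hr; simp [PySem.Dict.contains_empty] at hr)]
  rw [List.nil_append]
  rw [List.map_congr_left (fun f (_ : f ∈ top_files) => pv_row_eq
    ((PySem.Dict.ofList from_counts).items ++ (PySem.Dict.ofList simple_counts).items) f)]
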